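-- pv_equiv track=rewrite | github.com/Onnson/midigloves | prototype/bridge/config.py | snap_to_scale
-- ===== SOURCE A (Python) =====
-- SCALES = {
--     'chromatic':   [0, 1, 2, 3, 4, 5, 6, 7, 8, 9, 10, 11],
--     'major':       [0, 2, 4, 5, 7, 9, 11],
--     'minor':       [0, 2, 3, 5, 7, 8, 10],
--     'pentatonic':  [0, 2, 4, 7, 9],
--     'blues':       [0, 3, 5, 6, 7, 10],
--     'dorian':      [0, 2, 3, 5, 7, 9, 10],
--     'mixolydian':  [0, 2, 4, 5, 7, 9, 10],
--     'phrygian':    [0, 1, 3, 5, 7, 8, 10],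
--     'harmonic_minor': [0, 2, 3, 5, 7, 8, 11],
--     'melodic_minor':  [0, 2, 3, 5, 7, 9, 11],
--     'whole_tone':     [0, 2, 4, 6, 8, 10],
-- }
--
-- def snap_to_scale(midi_note, root, scale_name):
--     """Snap a MIDI note to the nearest note in the given scale.
--
--     If the note is already in scale, returns it unchanged.
--     Otherwise returns the closest in-scale note (preferring upward on ties).
--     """
--     intervals = SCALES.get(scale_name, SCALES['chromatic'])
--     if not intervals:
--         return midi_note
--
--     degree = (midi_note - root) % 12
--     if degree in intervals:
--         return midi_note
--
--     # Search outward from the note for the nearest in-scale note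
--     for offset in range(1, 7):
--         # Check above
--         up = midi_note + offset
--         if up <= 127 and ((up - root) % 12) in intervals:
--             return up
--         # Check below
--         down = midi_note - offset
--         if down >= 0 and ((down - root) % 12) in intervals:
--             return down
--
--     return midi_note
-- ===== SOURCE B (Python) =====
-- SCALES = {
--     'chromatic':   [0, 1, 2, 3, 4, 5, 6, 7, 8, 9, 10, 11],
--     'major':       [0, 2, 4, 5, 7, 9, 11],
--     'minor':       [0, 2, 3, 5, 7, 8, 10],
--     'pentatonic':  [0, 2, 4, 7, 9],
--     'blues':       [0, 3, 5, 6, 7, 10],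
--     'dorian':      [0, 2, 3, 5, 7, 9, 10],
--     'mixolydian':  [0, 2, 4, 5, 7, 9, 10],
--     'phrygian':    [0, 1, 3, 5, 7, 8, 10],
--     'harmonic_minor': [0, 2, 3, 5, 7, 8, 11],
--     'melodic_minor':  [0, 2, 3, 5, 7, 9, 11],
--     'whole_tone':     [0, 2, 4, 6, 8, 10],
-- }
--
-- def snap_to_scale(midi_note, root, scale_name):
--     """Snap a MIDI note to the nearest note in the given scale.
--
--     Candidate-list formulation: collect every admissible delta in one
--     comprehension and take the minimum by (distance, downward) so that
--     ties break upward; an in-scale note (delta 0 not needed) and an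
--     empty candidate list both leave the note unchanged.
--     """
--     intervals = SCALES.get(scale_name, SCALES['chromatic'])
--     if ((midi_note - root) % 12) in intervals:
--         return midi_note
--     cands = [d for d in range(-6, 7)
--              if d != 0
--              and (midi_note + d <= 127 if d > 0 else midi_note + d >= 0)
--              and ((midi_note + d - root) % 12) in intervals]
--     if not cands:
--         return midi_note
--     return midi_note + min(cands, key=lambda d: (abs(d), d < 0))
-- ===== Notes on version B (the rewrite author's own statement) =====
-- stated objective: alternative
-- what changed: Replaced A's outward scan with interleaved early returns by building the full candidate-delta list in one comprehension and selecting min by the key (abs(d), d<0), which encodes nearest-with-upward-tie-break declaratively.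
import Mathlib
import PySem

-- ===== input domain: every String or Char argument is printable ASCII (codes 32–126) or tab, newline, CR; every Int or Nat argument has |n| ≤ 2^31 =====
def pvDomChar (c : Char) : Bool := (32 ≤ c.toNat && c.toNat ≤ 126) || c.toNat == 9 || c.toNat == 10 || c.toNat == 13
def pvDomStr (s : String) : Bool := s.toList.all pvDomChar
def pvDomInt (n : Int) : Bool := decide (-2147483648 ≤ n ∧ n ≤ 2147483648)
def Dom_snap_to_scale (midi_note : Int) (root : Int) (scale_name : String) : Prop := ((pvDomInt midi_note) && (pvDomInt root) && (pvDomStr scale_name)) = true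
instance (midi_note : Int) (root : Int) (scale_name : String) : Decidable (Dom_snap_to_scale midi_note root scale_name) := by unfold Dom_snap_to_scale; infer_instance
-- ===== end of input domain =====

-- B replaces A's outward scan with interleaved early returns by a one-shot candidate
-- comprehension and a min-by-(distance, downward) selection; objective: alternative decomposition.

-- the module constant SCALES (shared context of both implementations)
def pvSCALES : PySem.Dict String (List Int) := PySem.Dict.ofList
  [("chromatic",   [0, 1, 2, 3, 4, 5, 6, 7, 8, 9, 10, 11]),
   ("major",       [0, 2, 4, 5, 7, 9, 11]),
   ("minor",       [0, 2, 3, 5, 7, 8, 10]),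
   ("pentatonic",  [0, 2, 4, 7, 9]),
   ("blues",       [0, 3, 5, 6, 7, 10]),
   ("dorian",      [0, 2, 3, 5, 7, 9, 10]),
   ("mixolydian",  [0, 2, 4, 5, 7, 9, 10]),
   ("phrygian",    [0, 1, 3, 5, 7, 8, 10]),
   ("harmonic_minor", [0, 2, 3, 5, 7, 8, 11]),
   ("melodic_minor",  [0, 2, 3, 5, 7, 9, 11]),
   ("whole_tone",     [0, 2, 4, 6, 8, 10])]

-- ===== PORT A =====
-- A's 'for offset in range(1, 7)' loop with its two early returns, step for step
def snapLoopA (m r : Int) (intervals : List Int) : List Int → Int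
  | [] => m
  | o :: rest =>
    if m + o ≤ 127 ∧ PySem.Int.mod (m + o - r) 12 ∈ intervals then m + o
    else if 0 ≤ m - o ∧ PySem.Int.mod (m - o - r) 12 ∈ intervals then m - o
    else snapLoopA m r intervals rest

def snap_to_scale (midi_note : Int) (root : Int) (scale_name : String) : Int :=
  -- SCALES['chromatic'] is a lookup that always succeeds on this literal dict; .getD [] only totalizes it
  let intervals := PySem.Dict.getD pvSCALES scale_name ((PySem.Dict.get? pvSCALES "chromatic").getD [])
  if intervals = [] then midi_note
  else
    let degree := PySem.Int.mod (midi_note - root) 12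
    if degree ∈ intervals then midi_note
    else snapLoopA midi_note root intervals (PySem.List.pyRange 1 7 1)

-- ===== PORT B =====
-- the comprehension's condition (Python: d != 0 and (m+d <= 127 if d > 0 else m+d >= 0) and ((m+d-root) % 12 in intervals))
def snapCandOK (m r : Int) (intervals : List Int) (d : Int) : Bool :=
  decide (d ≠ 0) &&
  (if 0 < d then decide (m + d ≤ 127) else decide (0 ≤ m + d)) &&
  decide (PySem.Int.mod (m + d - r) 12 ∈ intervals)

def snap_to_scale_alt (midi_note : Int) (root : Int) (scale_name : String) : Int :=
  let intervals := PySem.Dict.getD pvSCALES scale_name ((PySem.Dict.get? pvSCALES "chromatic").getD [])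
  if PySem.Int.mod (midi_note - root) 12 ∈ intervals then midi_note
  else
    let cands := (PySem.List.pyRange (-6) 7 1).filter (snapCandOK midi_note root intervals)
    -- 'if not cands: return midi_note' + 'midi_note + min(cands, key=lambda d: (abs(d), d < 0))':
    -- min2? is none exactly on the empty list; the bool key component d < 0 is ported as its int value
    match PySem.List.min2? cands (fun d => |d|) (fun d => if d < 0 then (1 : Int) else 0) with
    | some d => midi_note + d
    | none => midi_note

-- ===== PRECONDITION & SPEC =====
def Spec_snap_to_scale (midi_note : Int) (root : Int) (scale_name : String) (out : Int) : Prop := out = snap_to_scale_alt midi_note root scale_name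
instance (midi_note : Int) (root : Int) (scale_name : String) (out : Int) : Decidable (Spec_snap_to_scale midi_note root scale_name out) := by unfold Spec_snap_to_scale; infer_instance

-- ===== CLAIM (what is proved, stated in full; the proofs are below) =====
def Claim_equal_snap_to_scale : Prop := ∀ (midi_note : Int) (root : Int) (scale_name : String), Dom_snap_to_scale midi_note root scale_name → Spec_snap_to_scale midi_note root scale_name (snap_to_scale midi_note root scale_name)

-- ===== LEMMAS AND PROOFS =====

-- A's scan, abstracted to the 12 booleans it tests (u_o = up hit at offset o, w_o = down hit)
def pickA (u1 w1 u2 w2 u3 w3 u4 w4 u5 w5 u6 w6 : Bool) : Option Int :=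
  if u1 then some 1 else if w1 then some (-1) else
  if u2 then some 2 else if w2 then some (-2) else
  if u3 then some 3 else if w3 then some (-3) else
  if u4 then some 4 else if w4 then some (-4) else
  if u5 then some 5 else if w5 then some (-5) else
  if u6 then some 6 else if w6 then some (-6) else none

-- B's candidate list, abstracted to the same booleans (in the comprehension's order -6 … 6)
def candsOf (w6 w5 w4 w3 w2 w1 u1 u2 u3 u4 u5 u6 : Bool) : List Int :=
  (if w6 then [-6] else []) ++ (if w5 then [-5] else []) ++ (if w4 then [-4] else []) ++
  (if w3 then [-3] else []) ++ (if w2 then [-2] else []) ++ (if w1 then [-1] else []) ++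
  (if u1 then [1] else []) ++ (if u2 then [2] else []) ++ (if u3 then [3] else []) ++
  (if u4 then [4] else []) ++ (if u5 then [5] else []) ++ (if u6 then [6] else [])

-- the finite core: min-by-(|d|, d<0) over the candidate list is exactly A's scan order
set_option maxHeartbeats 2000000 in
theorem core_min_eq_pick : ∀ u1 w1 u2 w2 u3 w3 u4 w4 u5 w5 u6 w6 : Bool,
    PySem.List.min2? (candsOf w6 w5 w4 w3 w2 w1 u1 u2 u3 u4 u5 u6)
      (fun d => |d|) (fun d => if d < 0 then (1 : Int) else 0)
      = pickA u1 w1 u2 w2 u3 w3 u4 w4 u5 w5 u6 w6 := by decide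

theorem filt_aux {α : Type} (p : α → Bool) (a : α) (l : List α) :
    List.filter p (a :: l) = (if p a then [a] else []) ++ List.filter p l := by
  by_cases h : p a = true <;> simp [h]

theorem filter_eq_candsOf (m r : Int) (I : List Int) :
    (PySem.List.pyRange (-6) 7 1).filter (snapCandOK m r I)
      = candsOf (snapCandOK m r I (-6)) (snapCandOK m r I (-5)) (snapCandOK m r I (-4))
                (snapCandOK m r I (-3)) (snapCandOK m r I (-2)) (snapCandOK m r I (-1))
                (snapCandOK m r I 1) (snapCandOK m r I 2) (snapCandOK m r I 3)
                (snapCandOK m r I 4) (snapCandOK m r I 5) (snapCandOK m r I 6) := by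
  have h0 : snapCandOK m r I 0 = false := by simp [snapCandOK]
  have hr : PySem.List.pyRange (-6) 7 1 = [-6, -5, -4, -3, -2, -1, 0, 1, 2, 3, 4, 5, 6] := by decide
  rw [hr]
  simp only [filt_aux, List.filter_nil, h0, Bool.false_eq_true, if_false, List.nil_append,
    List.append_nil, List.append_assoc, candsOf]

theorem pick_match (m : Int) (u1 w1 u2 w2 u3 w3 u4 w4 u5 w5 u6 w6 : Bool) :
    (match pickA u1 w1 u2 w2 u3 w3 u4 w4 u5 w5 u6 w6 with
     | some d => m + d | none => m) =
    (if u1 then m + 1 else if w1 then m - 1 else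
     if u2 then m + 2 else if w2 then m - 2 else
     if u3 then m + 3 else if w3 then m - 3 else
     if u4 then m + 4 else if w4 then m - 4 else
     if u5 then m + 5 else if w5 then m - 5 else
     if u6 then m + 6 else if w6 then m - 6 else m) := by
  cases u1 with
  | true => rfl
  | false =>
    cases w1 with
    | true => rfl
    | false =>
      cases u2 with
      | true => rfl
      | false =>
        cases w2 with
        | true => rfl
        | false =>
          cases u3 with
          | true => rfl
          | false =>
            cases w3 with
            | true => rfl
            | false =>
              cases u4 with
              | true => rfl
              | false =>
                cases w4 with
                | true => rfl
                | false =>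
                  cases u5 with
                  | true => rfl
                  | false =>
                    cases w5 with
                    | true => rfl
                    | false =>
                      cases u6 with
                      | true => rfl
                      | false =>
                        cases w6 with
                        | true => rfl
                        | false => rfl

theorem cand_up (m r : Int) (I : List Int) (d : Int) (h : 0 < d) :
    snapCandOK m r I d = decide (m + d ≤ 127 ∧ PySem.Int.mod (m + d - r) 12 ∈ I) := by
  simp [snapCandOK, h, Bool.decide_and, decide_eq_false (by omega : ¬ d = 0)]

theorem cand_down (m r : Int) (I : List Int) (o : Int) (h : 0 < o) :
    snapCandOK m r I (-o) = decide (0 ≤ m - o ∧ PySem.Int.mod (m - o - r) 12 ∈ I) := by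
  simp [snapCandOK, Bool.decide_and, sub_eq_add_neg,
    decide_eq_false (by omega : ¬ o = 0), if_neg (by omega : ¬ o < 0)]

set_option maxHeartbeats 1000000 in
theorem loopA_eq_pick (m r : Int) (I : List Int) :
    snapLoopA m r I (PySem.List.pyRange 1 7 1)
      = (match pickA (snapCandOK m r I 1) (snapCandOK m r I (-1)) (snapCandOK m r I 2) (snapCandOK m r I (-2))
                 (snapCandOK m r I 3) (snapCandOK m r I (-3)) (snapCandOK m r I 4) (snapCandOK m r I (-4))
                 (snapCandOK m r I 5) (snapCandOK m r I (-5)) (snapCandOK m r I 6) (snapCandOK m r I (-6)) with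
         | some d => m + d
         | none => m) := by
  have hr : PySem.List.pyRange 1 7 1 = [1, 2, 3, 4, 5, 6] := by decide
  rw [hr, pick_match]
  rw [cand_up m r I 1 (by norm_num), cand_up m r I 2 (by norm_num), cand_up m r I 3 (by norm_num),
      cand_up m r I 4 (by norm_num), cand_up m r I 5 (by norm_num), cand_up m r I 6 (by norm_num)]
  rw [show (-1 : Int) = -(1:Int) from rfl]
  rw [cand_down m r I 1 (by norm_num), cand_down m r I 2 (by norm_num), cand_down m r I 3 (by norm_num),
      cand_down m r I 4 (by norm_num), cand_down m r I 5 (by norm_num), cand_down m r I 6 (by norm_num)]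
  simp only [snapLoopA, decide_eq_true_eq]

-- both bodies, with the looked-up interval list generalized to an arbitrary list
theorem body_eq (m r : Int) (I : List Int) :
    (if I = [] then m
     else if PySem.Int.mod (m - r) 12 ∈ I then m
     else snapLoopA m r I (PySem.List.pyRange 1 7 1))
    = (if PySem.Int.mod (m - r) 12 ∈ I then m
       else
         match PySem.List.min2? ((PySem.List.pyRange (-6) 7 1).filter (snapCandOK m r I))
             (fun d => |d|) (fun d => if d < 0 then (1 : Int) else 0) with
         | some d => m + d
         | none => m) := by
  by_cases hmem : PySem.Int.mod (m - r) 12 ∈ I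
  · simp only [if_pos hmem]
    by_cases hnil : I = []
    · rw [if_pos hnil]
    · rw [if_neg hnil]
  · simp only [if_neg hmem]
    by_cases hnil : I = []
    · subst hnil
      have hf : (PySem.List.pyRange (-6) 7 1).filter (snapCandOK m r []) = [] := by
        simp [snapCandOK]
      simp [hf, PySem.List.min2?]
    · rw [if_neg hnil, filter_eq_candsOf, core_min_eq_pick, loopA_eq_pick]

-- ===== VERDICT (by name: the statement is the Claim_ definition above) =====
theorem snap_to_scale_spec : Claim_equal_snap_to_scale := by
  intro m r s _
  show snap_to_scale m r s = snap_to_scale_alt m r s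
  unfold snap_to_scale snap_to_scale_alt
  exact body_eq m r _
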